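-- pv_equiv track=rewrite | github.com/schanbaek/the_atlas | Codes/util.py | list_apical_jcs
-- ===== SOURCE A (Python) =====
-- def calculate_dist(pair1, pair2):
--     return min(abs(pair1[0]-pair2[0]), abs(pair1[1]-pair2[1]))
--
-- def list_apical_jcs(infos, minss, init): # [ (1, 124), (2, 123), ... ]
--     jcpos, dist = [], init
--     for uppair, lowpair in zip(infos[:-1], infos[1:]):
--         jcsize = abs(uppair[0]-lowpair[0])+abs(lowpair[1]-uppair[1])-2
--         if jcsize>=minss:
--             jcpos.append((dist,uppair,jcsize))
--         dist += calculate_dist(uppair,lowpair)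
--     jcpos.append((dist,infos[-1],infos[-1][1]-infos[-1][0]))
--     return jcpos
-- ===== SOURCE B (Python) =====
-- def list_apical_jcs(infos, minss, init):
--     n = len(infos)
--     last = infos[-1]            # IndexError on empty input, as in the original
--     dists = [init]
--     for i in range(n - 1):
--         a, b = infos[i], infos[i + 1]
--         dists.append(dists[-1] + min(abs(a[0] - b[0]), abs(a[1] - b[1])))
--     out = []
--     for i in range(n - 1):
--         a, b = infos[i], infos[i + 1]
--         jcsize = abs(a[0] - b[0]) + abs(b[1] - a[1]) - 2
--         if jcsize >= minss:
--             out.append((dists[i], a, jcsize))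
--     out.append((dists[-1], last, last[1] - last[0]))
--     return out
-- ===== Notes on version B (the rewrite author's own statement) =====
-- stated objective: alternative
-- what changed: Replaces A's single zip-of-slices loop with an inline running-distance accumulator by a two-pass index-based design: first a precomputed prefix-distance table, then an index loop that consults the table when emitting junctions.
-- outside the precondition, e.g. on list_apical_jcs([], 0, 0): A raises IndexError, B raises IndexError
import Mathlib
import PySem

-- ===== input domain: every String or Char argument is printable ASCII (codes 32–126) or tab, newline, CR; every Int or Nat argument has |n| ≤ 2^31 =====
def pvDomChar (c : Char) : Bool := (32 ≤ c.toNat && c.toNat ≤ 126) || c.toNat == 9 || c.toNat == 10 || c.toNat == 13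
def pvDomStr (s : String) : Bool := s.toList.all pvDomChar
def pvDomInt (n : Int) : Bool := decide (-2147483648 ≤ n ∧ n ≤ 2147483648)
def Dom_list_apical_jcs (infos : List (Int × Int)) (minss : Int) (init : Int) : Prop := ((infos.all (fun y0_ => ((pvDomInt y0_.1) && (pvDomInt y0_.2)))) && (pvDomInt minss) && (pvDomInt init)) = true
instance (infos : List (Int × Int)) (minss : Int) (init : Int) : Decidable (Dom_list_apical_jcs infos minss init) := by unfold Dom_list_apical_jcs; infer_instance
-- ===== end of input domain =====

-- B rebuilds the result in two index-based passes over a precomputed prefix-distance table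
-- instead of A's single zip loop with an inline running accumulator (objective: alternative).

-- ===== PORT A =====
def calculate_dist (pair1 pair2 : Int × Int) : Int :=
  min |pair1.1 - pair2.1| |pair1.2 - pair2.2|

def list_apical_jcs (infos : List (Int × Int)) (minss : Int) (init : Int) : List (Int × (Int × Int) × Int) :=
  -- jcpos, dist = [], init; for uppair, lowpair in zip(infos[:-1], infos[1:]): ...
  let st := ((PySem.List.slice infos none (some (-1))).zip (PySem.List.slice infos (some 1) none)).foldl
    (fun (st : List (Int × (Int × Int) × Int) × Int) pq =>
      let up := pq.1
      let low := pq.2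
      let jcsize := |up.1 - low.1| + |low.2 - up.2| - 2
      let jcpos := if jcsize ≥ minss then st.1 ++ [(st.2, up, jcsize)] else st.1
      (jcpos, st.2 + calculate_dist up low)) ([], init)
  match PySem.List.pyGet? infos (-1) with
  | none => []  -- infos[-1] raises IndexError on empty infos; excluded by Pre_
  | some last => st.1 ++ [(st.2, last, last.2 - last.1)]

-- ===== PORT B =====
def list_apical_jcs_alt (infos : List (Int × Int)) (minss : Int) (init : Int) : List (Int × (Int × Int) × Int) :=
  match PySem.List.pyGet? infos (-1) with
  | none => []  -- infos[-1] raises IndexError on empty infos; excluded by Pre_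
  | some last =>
    let n : Int := infos.length
    let dists := (PySem.List.pyRange 0 (n - 1) 1).foldl
      (fun ds i =>
        let a := PySem.List.pyGetD infos i (0, 0)
        let b := PySem.List.pyGetD infos (i + 1) (0, 0)
        ds ++ [PySem.List.pyGetD ds (-1) 0 + min |a.1 - b.1| |a.2 - b.2|]) [init]
    let out := (PySem.List.pyRange 0 (n - 1) 1).foldl
      (fun out i =>
        let a := PySem.List.pyGetD infos i (0, 0)
        let b := PySem.List.pyGetD infos (i + 1) (0, 0)
        let jcsize := |a.1 - b.1| + |b.2 - a.2| - 2
        if jcsize ≥ minss then out ++ [(PySem.List.pyGetD dists i 0, a, jcsize)] else out) []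
    out ++ [(PySem.List.pyGetD dists (-1) 0, last, last.2 - last.1)]

-- ===== PRECONDITION & SPEC =====
-- Pre_ excludes only the empty list, on which both programs raise IndexError at infos[-1].
def Pre_list_apical_jcs (infos : List (Int × Int)) (minss : Int) (init : Int) : Prop := infos ≠ []
instance (infos : List (Int × Int)) (minss : Int) (init : Int) : Decidable (Pre_list_apical_jcs infos minss init) := by unfold Pre_list_apical_jcs; infer_instance
def pvWitness_list_apical_jcs : (List (Int × Int)) × Int × Int := ([(1, 124), (2, 123), (10, 100)], 3, 0)

def Spec_list_apical_jcs (infos : List (Int × Int)) (minss : Int) (init : Int) (out : List (Int × (Int × Int) × Int)) : Prop := out = list_apical_jcs_alt infos minss init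
instance (infos : List (Int × Int)) (minss : Int) (init : Int) (out : List (Int × (Int × Int) × Int)) : Decidable (Spec_list_apical_jcs infos minss init out) := by unfold Spec_list_apical_jcs; infer_instance

-- ===== CLAIM (what is proved, stated in full; the proofs are below) =====
def Claim_equal_list_apical_jcs : Prop := ∀ (infos : List (Int × Int)) (minss : Int) (init : Int), Dom_list_apical_jcs infos minss init → Pre_list_apical_jcs infos minss init → Spec_list_apical_jcs infos minss init (list_apical_jcs infos minss init)

-- ===== LEMMAS AND PROOFS =====

-- Common recursive reference function: the intended result on a nonempty list.
def goJ (minss : Int) : List (Int × Int) → Int → List (Int × (Int × Int) × Int)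
  | [], _ => []
  | [p], d => [(d, p, p.2 - p.1)]
  | p :: q :: r, d =>
      (if |p.1 - q.1| + |q.2 - p.2| - 2 ≥ minss then [(d, p, |p.1 - q.1| + |q.2 - p.2| - 2)] else []) ++
      goJ minss (q :: r) (d + min |p.1 - q.1| |p.2 - q.2|)

theorem getLast?_eq_getLastD (p : Int × Int) (rest : List (Int × Int)) :
    (p :: rest).getLast? = some ((p :: rest).getLastD (0, 0)) := by
  induction rest generalizing p with
  | nil => rfl
  | cons q r ih => rw [List.getLast?_cons_cons, ih q]; simp

-- ---- A side ----
def stepA (minss : Int) (st : List (Int × (Int × Int) × Int) × Int) (pq : (Int × Int) × (Int × Int)) :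
    List (Int × (Int × Int) × Int) × Int :=
  let up := pq.1
  let low := pq.2
  let jcsize := |up.1 - low.1| + |low.2 - up.2| - 2
  let jcpos := if jcsize ≥ minss then st.1 ++ [(st.2, up, jcsize)] else st.1
  (jcpos, st.2 + calculate_dist up low)

theorem foldA (minss : Int) : ∀ (rest : List (Int × Int)) (p : Int × Int) (d : Int)
    (acc : List (Int × (Int × Int) × Int)),
    (((p :: rest).dropLast.zip rest).foldl (stepA minss) (acc, d)).1
      ++ [((((p :: rest).dropLast.zip rest).foldl (stepA minss) (acc, d)).2,
           (p :: rest).getLastD (0, 0),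
           ((p :: rest).getLastD (0, 0)).2 - ((p :: rest).getLastD (0, 0)).1)]
    = acc ++ goJ minss (p :: rest) d := by
  intro rest
  induction rest with
  | nil => intro p d acc; simp [goJ]
  | cons q r ih =>
    intro p d acc
    have hz : (p :: q :: r).dropLast.zip (q :: r)
        = (p, q) :: ((q :: r).dropLast.zip r) := by
      simp [List.dropLast_cons_of_ne_nil]
    have hl : (p :: q :: r).getLastD (0, 0) = (q :: r).getLastD (0, 0) := by
      simp
    have hstep : stepA minss (acc, d) (p, q)
        = ((if |p.1 - q.1| + |q.2 - p.2| - 2 ≥ minss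
            then acc ++ [(d, p, |p.1 - q.1| + |q.2 - p.2| - 2)] else acc),
           d + min |p.1 - q.1| |p.2 - q.2|) := by
      simp [stepA, calculate_dist]
    rw [hz, List.foldl_cons, hstep, hl, ih q (d + min |p.1 - q.1| |p.2 - q.2|)]
    simp only [goJ]
    split_ifs <;> simp

theorem A_eq_go (minss : Int) (rest : List (Int × Int)) (p : Int × Int) (d : Int) :
    list_apical_jcs (p :: rest) minss d = goJ minss (p :: rest) d := by
  unfold list_apical_jcs
  rw [PySem.List.slice_to_neg_one, PySem.List.slice_from_one, PySem.List.pyGet?_neg_one,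
      getLast?_eq_getLastD]
  have := foldA minss rest p d []
  simpa [stepA, calculate_dist] using this

-- ---- B side ----
def cdist (xs : List (Int × Int)) (k : Nat) : Int :=
  min |(xs.getD k (0, 0)).1 - (xs.getD (k + 1) (0, 0)).1|
      |(xs.getD k (0, 0)).2 - (xs.getD (k + 1) (0, 0)).2|

def jcsz (xs : List (Int × Int)) (k : Nat) : Int :=
  |(xs.getD k (0, 0)).1 - (xs.getD (k + 1) (0, 0)).1|
    + |(xs.getD (k + 1) (0, 0)).2 - (xs.getD k (0, 0)).2| - 2

def scanOf (c : Nat → Int) : List Nat → Int → List Int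
  | [], _ => []
  | k :: t, d => (d + c k) :: scanOf c t (d + c k)

theorem fold_scan (c : Nat → Int) : ∀ (ks : List Nat) (acc : List Int) (h : acc ≠ []),
    ks.foldl (fun ds k => ds ++ [PySem.List.pyGetD ds (-1) 0 + c k]) acc
      = acc ++ scanOf c ks (acc.getLast h) := by
  intro ks
  induction ks with
  | nil => intro acc h; simp [scanOf]
  | cons k t ih =>
    intro acc h
    rw [List.foldl_cons, PySem.List.pyGetD_neg_one acc 0 h,
        ih (acc ++ [acc.getLast h + c k]) (by simp)]
    simp [scanOf]

theorem scanOf_map_succ (c : Nat → Int) : ∀ (ks : List Nat) (d : Int),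
    scanOf c (ks.map Nat.succ) d = scanOf (fun k => c (k + 1)) ks d := by
  intro ks
  induction ks with
  | nil => intro d; simp [scanOf]
  | cons k t ih => intro d; simp [scanOf, Nat.succ_eq_add_one, ih]

theorem foldl_ifapp_acc {β : Type} (g : Nat → β) (P : Nat → Prop) [DecidablePred P] :
    ∀ (ks : List Nat) (acc : List β),
    ks.foldl (fun out k => if P k then out ++ [g k] else out) acc
      = acc ++ ks.foldl (fun out k => if P k then out ++ [g k] else out) ([] : List β) := by
  intro ks
  induction ks with
  | nil => intro acc; simp
  | cons k t ih =>
    intro acc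
    rw [List.foldl_cons, List.foldl_cons, ih]
    conv_rhs => rw [ih (if P k then [] ++ [g k] else [])]
    split_ifs <;> simp

def bodyB (minss : Int) (p : Int × Int) (rest : List (Int × Int)) (d : Int) :
    List (Int × (Int × Int) × Int) :=
  let xs := p :: rest
  let m := rest.length
  let dists : List Int := d :: scanOf (cdist xs) (List.range m) d
  ((List.range m).foldl
      (fun out k => if jcsz xs k ≥ minss
        then out ++ [(dists.getD k 0, xs.getD k (0, 0), jcsz xs k)] else out) [])
    ++ [(dists.getLastD 0, xs.getLastD (0, 0),
         (xs.getLastD (0, 0)).2 - (xs.getLastD (0, 0)).1)]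

theorem B_body (minss : Int) (rest : List (Int × Int)) (p : Int × Int) (d : Int) :
    list_apical_jcs_alt (p :: rest) minss d = bodyB minss p rest d := by
  unfold list_apical_jcs_alt
  rw [PySem.List.pyGet?_neg_one, getLast?_eq_getLastD]
  have hn : (((p :: rest).length : Int)) - 1 = (rest.length : Int) := by simp
  have hd : (List.range rest.length).foldl
      (fun ds k => ds ++ [PySem.List.pyGetD ds (-1) 0 + cdist (p :: rest) k]) [d]
      = [d] ++ scanOf (cdist (p :: rest)) (List.range rest.length) d := by
    rw [fold_scan (cdist (p :: rest)) (List.range rest.length) [d] (by simp)]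
    rfl
  simp only [cdist] at hd
  simp only [hn, PySem.List.pyRange_zero_natCast, List.foldl_map,
    PySem.List.pyGetD_natCast, ← Nat.cast_add_one, hd]
  rw [PySem.List.pyGetD_neg_one _ 0 (by simp)]
  simp only [bodyB, jcsz, List.singleton_append]
  rw [List.getLast_eq_getLastD]
  simp [List.getLast?_cons, List.getLastD_eq_getLast?]

theorem body_go (minss : Int) : ∀ (rest : List (Int × Int)) (p : Int × Int) (d : Int),
    bodyB minss p rest d = goJ minss (p :: rest) d := by
  intro rest
  induction rest with
  | nil => intro p d; simp [bodyB, goJ, scanOf]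
  | cons q r ih =>
    intro p d
    have hc : (fun k => cdist (p :: q :: r) (k + 1)) = cdist (q :: r) := by
      funext k; simp [cdist]
    have hj : ∀ k, jcsz (p :: q :: r) (k + 1) = jcsz (q :: r) k := by
      intro k; simp [jcsz]
    simp only [bodyB, List.length_cons, List.range_succ_eq_map, List.foldl_cons,
      List.foldl_map, scanOf, scanOf_map_succ, hc, Nat.succ_eq_add_one, hj,
      List.getD_cons_succ, List.getD_cons_zero, List.getLastD_cons]
    rw [foldl_ifapp_acc]
    simp only [goJ]
    have h0 : cdist (p :: q :: r) 0 = min |p.1 - q.1| |p.2 - q.2| := by simp [cdist]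
    have j0 : jcsz (p :: q :: r) 0 = |p.1 - q.1| + |q.2 - p.2| - 2 := by simp [jcsz]
    rw [h0, j0]
    rw [← ih q (d + min |p.1 - q.1| |p.2 - q.2|)]
    simp only [bodyB, List.getLastD_cons]
    split_ifs <;> simp

theorem B_eq_go (minss : Int) (rest : List (Int × Int)) (p : Int × Int) (d : Int) :
    list_apical_jcs_alt (p :: rest) minss d = goJ minss (p :: rest) d := by
  rw [B_body, body_go]

-- ===== VERDICT (by name: the statement is the Claim_ definition above) =====
theorem list_apical_jcs_spec : Claim_equal_list_apical_jcs := by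
  intro infos minss init _ hpre
  cases infos with
  | nil => exact absurd rfl hpre
  | cons p rest =>
    unfold Spec_list_apical_jcs
    rw [A_eq_go, B_eq_go]
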